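-- pv_equiv track=rewrite | github.com/QuantInsti/QuantInsti-Live-Algo-Trading-Setups | ibkr-multi-asset/user_config/broker_constraint_report.py | _chunk_long_line
-- ===== SOURCE A (Python) =====
-- def _chunk_long_line(line: str, max_chars: int = 95) -> list[str]:
--     """Split a long line into sub-lines that each fit on one visual row."""
--     if len(line) <= max_chars:
--         return [line]
--     # Try to break at a comma+space boundary near max_chars
--     chunks = []
--     remaining = line
--     while len(remaining) > max_chars:
--         split_at = remaining.rfind(", ", 0, max_chars)
--         if split_at == -1:
--             split_at = max_chars
--         else:
--             split_at += 1  # include the comma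
--         chunks.append(remaining[:split_at].rstrip())
--         remaining = "  " + remaining[split_at:].lstrip()
--     if remaining.strip():
--         chunks.append(remaining)
--     return chunks
-- ===== SOURCE B (Python) =====
-- def _chunk_long_line(line: str, max_chars: int = 95) -> list[str]:
--     """Split a long line into sub-lines that each fit on one visual row.
--
--     Single index-based pass over `line`: tracks the current segment start
--     instead of rebuilding the remaining string each iteration.
--     """
--     n = len(line)
--     if n <= max_chars:
--         return [line]
--     chunks = []
--     pos = 0   # start of the unprocessed part of line
--     p = 0     # width of the implicit indent prefix (0 first, 2 afterwards)
--     while p + (n - pos) > max_chars: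
--         j = line.rfind(", ", pos, pos + max_chars - p)
--         cut = pos + max_chars - p if j == -1 else j + 1
--         piece = line[pos:cut].rstrip()
--         chunks.append(" " * p + piece if piece else "")
--         pos = cut
--         while pos < n and line[pos] in " \t\n\r\v\f":
--             pos += 1
--         p = 2
--     if pos < n:
--         chunks.append("  " + line[pos:])
--     return chunks
-- ===== Notes on version B (the rewrite author's own statement) =====
-- stated objective: faster
-- what changed: B wraps the line in a single index-based pass that tracks the current segment start (and an implicit 2-space indent width) in the original string, instead of A's loop that rebuilds and copies the whole remaining string on every iteration.
-- outside the precondition, e.g. on _chunk_long_line('ab ', 2): A returns ['ab'], B returns ['ab']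
import Mathlib
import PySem

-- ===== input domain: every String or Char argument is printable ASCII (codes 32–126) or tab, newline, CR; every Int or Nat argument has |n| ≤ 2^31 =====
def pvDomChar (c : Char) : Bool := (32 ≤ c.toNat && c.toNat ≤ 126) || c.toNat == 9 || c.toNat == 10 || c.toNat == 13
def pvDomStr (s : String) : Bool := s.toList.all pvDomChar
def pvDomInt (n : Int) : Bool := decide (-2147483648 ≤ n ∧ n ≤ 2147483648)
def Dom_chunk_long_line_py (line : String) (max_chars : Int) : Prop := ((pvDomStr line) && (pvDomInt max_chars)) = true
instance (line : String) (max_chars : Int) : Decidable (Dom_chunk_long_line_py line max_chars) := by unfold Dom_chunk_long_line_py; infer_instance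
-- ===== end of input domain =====

-- B re-implements A's comma-boundary line wrapping as a single index-based pass over the
-- original string (tracking the segment start) instead of rebuilding the remaining string
-- each iteration; equality of return values is proved on Pre_ (A's loop does not terminate
-- for max_chars ≤ 2 on most longer lines, so those inputs are excluded).

-- ===== PORT A =====
-- the search string ", "
def pvSub : List Char := [',', ' ']

-- A's while loop; `fuel` is only a totality guard (never exhausted on Pre_ inputs)
def aLoop (fuel : Nat) (maxc : Int) (remaining : List Char) (chunks : List (List Char)) :
    List (List Char) :=
  match fuel with
  | 0 => chunks
  | fuel + 1 =>
    if maxc < (remaining.length : Int) then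
      -- split_at = remaining.rfind(", ", 0, max_chars); -1 → max_chars, else +1
      let r := PySem.Chars.rfindFrom remaining pvSub 0 (some maxc)
      let split_at : Int := if r = -1 then maxc else r + 1
      -- chunks.append(remaining[:split_at].rstrip())
      let chunk := PySem.Chars.rstrip (PySem.List.slice remaining none (some split_at))
      -- remaining = "  " + remaining[split_at:].lstrip()
      aLoop fuel maxc ([' ', ' '] ++ PySem.Chars.lstrip (PySem.List.slice remaining (some split_at) none))
        (chunks ++ [chunk])
    else
      -- if remaining.strip(): chunks.append(remaining)
      if PySem.Chars.strip remaining = [] then chunks else chunks ++ [remaining]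

def chunk_long_line_py (line : String) (max_chars : Int) : List String :=
  let cs := line.toList
  if (cs.length : Int) ≤ max_chars then [line]
  else (aLoop (cs.length + 2) max_chars cs []).map (fun c => String.ofList c)

-- ===== PORT B =====
-- the whitespace characters B's inner loop skips: " \t\n\r\v\f"
def pvWs : List Char := [' ', '\t', '\n', '\r', Char.ofNat 11, Char.ofNat 12]

-- B's inner `while pos < n and line[pos] in " \t\n\r\v\f": pos += 1`
def skipWs (cs : List Char) (pos : Nat) : Nat :=
  if h : pos < cs.length then
    if cs[pos] ∈ pvWs then skipWs cs (pos + 1) else pos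
  else pos
termination_by cs.length - pos
decreasing_by omega

-- B's while loop; `fuel` is only a totality guard (never exhausted on Pre_ inputs)
def bLoop (fuel : Nat) (line : List Char) (maxc : Int) (pos p : Nat)
    (chunks : List (List Char)) : List (List Char) :=
  match fuel with
  | 0 => chunks
  | fuel + 1 =>
    if maxc < (p : Int) + ((line.length : Int) - (pos : Int)) then
      -- j = line.rfind(", ", pos, pos + max_chars - p)
      let j := PySem.Chars.rfindFrom line pvSub (pos : Int) (some ((pos : Int) + maxc - (p : Int)))
      let cut : Int := if j = -1 then (pos : Int) + maxc - (p : Int) else j + 1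
      -- piece = line[pos:cut].rstrip(); chunks.append(" " * p + piece if piece else "")
      let piece := PySem.Chars.rstrip (PySem.List.slice line (some (pos : Int)) (some cut))
      let chunk := if piece = [] then [] else List.replicate p ' ' ++ piece
      bLoop fuel line maxc (skipWs line cut.toNat) 2 (chunks ++ [chunk])
    else
      -- if pos < n: chunks.append("  " + line[pos:])
      if pos < line.length then chunks ++ [[' ', ' '] ++ line.drop pos] else chunks

def chunk_long_line_py_alt (line : String) (max_chars : Int) : List String :=
  let cs := line.toList
  if (cs.length : Int) ≤ max_chars then [line]
  else (bLoop (cs.length + 1) cs max_chars 0 0 []).map (fun c => String.ofList c)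

-- ===== PRECONDITION & SPEC =====
-- Pre_ excludes max_chars ≤ 2 on lines longer than max_chars: there A's while loop
-- re-creates the same `remaining` ("  " + rest) and usually never terminates.
def Pre_chunk_long_line_py (line : String) (max_chars : Int) : Prop :=
  PySem.Str.len line ≤ max_chars ∨ 3 ≤ max_chars
instance (line : String) (max_chars : Int) : Decidable (Pre_chunk_long_line_py line max_chars) := by
  unfold Pre_chunk_long_line_py; infer_instance

def pvWitness_chunk_long_line_py : String × Int := ("alpha, beta, gamma", 8)

def Spec_chunk_long_line_py (line : String) (max_chars : Int) (out : List String) : Prop := out = chunk_long_line_py_alt line max_chars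
instance (line : String) (max_chars : Int) (out : List String) : Decidable (Spec_chunk_long_line_py line max_chars out) := by unfold Spec_chunk_long_line_py; infer_instance

-- ===== CLAIM (what is proved, stated in full; the proofs are below) =====
def Claim_equal_chunk_long_line_py : Prop := ∀ (line : String) (max_chars : Int), Dom_chunk_long_line_py line max_chars → Pre_chunk_long_line_py line max_chars → Spec_chunk_long_line_py line max_chars (chunk_long_line_py line max_chars)

-- ===== LEMMAS AND PROOFS =====

-- rfind.go equations
lemma go_zero (s sub : List Char) :
    PySem.Chars.rfind.go s sub 0 = if sub.isPrefixOf s then 0 else -1 := by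
  simp [PySem.Chars.rfind.go]

lemma go_succ (s sub : List Char) (j : Nat) :
    PySem.Chars.rfind.go s sub (j + 1) =
      if sub.isPrefixOf (s.drop (j + 1)) then ((j : Int) + 1) else PySem.Chars.rfind.go s sub j := by
  rw [PySem.Chars.rfind.go]; push_cast; rfl

-- if go returns an index, it is ≤ k and ", " is a prefix there
lemma go_spec (s : List Char) (k : Nat) (h : PySem.Chars.rfind.go s pvSub k ≠ -1) :
    0 ≤ PySem.Chars.rfind.go s pvSub k ∧ PySem.Chars.rfind.go s pvSub k ≤ (k : Int) ∧
      pvSub <+: s.drop (PySem.Chars.rfind.go s pvSub k).toNat := by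
  induction k with
  | zero =>
      rw [go_zero] at h ⊢
      by_cases hb : pvSub.isPrefixOf s = true
      · simp only [hb, if_pos]
        refine ⟨le_refl _, le_refl _, ?_⟩
        simpa using List.isPrefixOf_iff_prefix.mp hb
      · simp [hb] at h
  | succ j ih =>
      rw [go_succ] at h ⊢
      by_cases hb : pvSub.isPrefixOf (s.drop (j + 1)) = true
      · simp only [hb, if_pos]
        refine ⟨by positivity, by push_cast; omega, ?_⟩
        have ht : ((j : Int) + 1).toNat = j + 1 := by omega
        rw [ht]
        exact List.isPrefixOf_iff_prefix.mp hb
      · simp only [hb, Bool.false_eq_true, if_false] at h ⊢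
        obtain ⟨h1, h2, h3⟩ := ih h
        exact ⟨h1, by push_cast; omega, h3⟩

-- ", " never starts inside a space prefix: shift lemma for rfind.go
lemma not_prefix_space (l : List Char) : pvSub.isPrefixOf (' ' :: l) = false := by
  simp [pvSub, List.isPrefixOf]

lemma go_shift (p : Nat) (hp : p = 0 ∨ p = 2) (u : List Char) (k : Nat) :
    PySem.Chars.rfind.go (List.replicate p ' ' ++ u) pvSub (p + k) =
      if PySem.Chars.rfind.go u pvSub k = -1 then -1
      else (p : Int) + PySem.Chars.rfind.go u pvSub k := by
  induction k with
  | zero =>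
      rcases hp with rfl | rfl
      · rw [go_zero]
        simp only [List.replicate, List.nil_append, Nat.cast_zero]
        rw [go_zero]
        by_cases hb : pvSub.isPrefixOf u = true <;> simp [hb]
      · show PySem.Chars.rfind.go (' ' :: ' ' :: u) pvSub (1 + 1) = _
        rw [go_succ, go_succ, go_zero]
        simp only [List.drop_succ_cons, List.drop_zero]
        simp only [not_prefix_space, Bool.false_eq_true, if_false]
        rw [go_zero]
        by_cases hb : pvSub.isPrefixOf u = true <;> simp [hb]
  | succ k ih =>
      have hpk : p + (k + 1) = (p + k) + 1 := by omega
      rw [hpk, go_succ, go_succ]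
      have hd : (List.replicate p ' ' ++ u).drop (p + k + 1) = u.drop (k + 1) := by
        rw [List.drop_append, List.drop_replicate]
        have h1 : p - (p + k + 1) = 0 := by omega
        have h2 : p + k + 1 - (List.replicate p ' ').length = k + 1 := by
          simp [List.length_replicate]; omega
        rw [h1, h2]; rfl
      rw [hd]
      by_cases hb : pvSub.isPrefixOf (u.drop (k + 1)) = true
      · simp only [hb, if_pos]
        have : ((k : Int) + 1) ≠ -1 := by omega
        simp only [this, Nat.cast_add]
        push_cast; omega
      · simp only [hb, Bool.false_eq_true, if_false, ih]

lemma rfind_shift (p : Nat) (hp : p = 0 ∨ p = 2) (u : List Char) :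
    PySem.Chars.rfind (List.replicate p ' ' ++ u) pvSub =
      if PySem.Chars.rfind u pvSub = -1 then -1 else (p : Int) + PySem.Chars.rfind u pvSub := by
  have h := go_shift p hp u u.length
  simpa [PySem.Chars.rfind, List.length_append, List.length_replicate] using h

-- rstrip over a space prefix
lemma rstrip_rep_append (p : Nat) (u : List Char) :
    PySem.Chars.rstrip (List.replicate p ' ' ++ u) =
      if PySem.Chars.rstrip u = [] then [] else List.replicate p ' ' ++ PySem.Chars.rstrip u := by
  unfold PySem.Chars.rstrip
  rw [List.reverse_append, List.reverse_replicate, List.dropWhile_append]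
  have hrep : List.dropWhile PySem.Chars.isspace (List.replicate p ' ') = [] := by
    rw [List.dropWhile_eq_nil_iff]
    intro x hx
    rw [List.eq_of_mem_replicate hx]
    decide
  by_cases he : List.dropWhile PySem.Chars.isspace u.reverse = []
  · simp [he, hrep]
  · have : (List.dropWhile PySem.Chars.isspace u.reverse).isEmpty = false := by
      simpa [List.isEmpty_iff] using he
    simp only [this, Bool.false_eq_true, if_false, List.reverse_append, List.reverse_replicate]
    rw [if_neg (by simpa [List.reverse_eq_nil_iff] using he)]

-- B's six whitespace characters are Python whitespace …
lemma ws_isspace (c : Char) (h : c ∈ pvWs) : PySem.Chars.isspace c = true := by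
  fin_cases h <;> decide

-- … and on Dom characters they are the only ones
lemma dom_isspace_ws (c : Char) (hdom : pvDomChar c = true)
    (h : PySem.Chars.isspace c = true) : c ∈ pvWs := by
  have hn : c.toNat = 32 ∨ c.toNat = 9 ∨ c.toNat = 10 ∨ c.toNat = 13 := by
    simp only [pvDomChar, Bool.or_eq_true, Bool.and_eq_true, decide_eq_true_eq,
      beq_iff_eq] at hdom
    simp only [PySem.Chars.isspace, Bool.or_eq_true, Bool.and_eq_true, decide_eq_true_eq] at h
    omega
  rcases hn with h' | h' | h' | h'
  · have : c = ' ' := by apply Char.ext; apply UInt32.toNat_inj.mp; exact h'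
    rw [this]; decide
  · have : c = '\t' := by apply Char.ext; apply UInt32.toNat_inj.mp; exact h'
    rw [this]; decide
  · have : c = '\n' := by apply Char.ext; apply UInt32.toNat_inj.mp; exact h'
    rw [this]; decide
  · have : c = '\r' := by apply Char.ext; apply UInt32.toNat_inj.mp; exact h'
    rw [this]; decide

lemma skipWs_ge (cs : List Char) (pos : Nat) : pos ≤ skipWs cs pos := by
  fun_induction skipWs <;> omega

lemma skipWs_le (cs : List Char) (pos : Nat) : pos ≤ cs.length → skipWs cs pos ≤ cs.length := by
  fun_induction skipWs with
  | case1 pos h hm ih => intro _; exact ih (by omega)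
  | case2 pos h hm => intro h'; exact h'
  | case3 pos h => intro h'; exact h'

lemma skipWs_drop (cs : List Char) (hdom : ∀ c ∈ cs, pvDomChar c = true) (pos : Nat) :
    cs.drop (skipWs cs pos) = List.dropWhile PySem.Chars.isspace (cs.drop pos) := by
  fun_induction skipWs with
  | case1 pos h hm ih =>
      rw [ih, List.drop_eq_getElem_cons h, List.dropWhile_cons_of_pos (ws_isspace _ hm)]
  | case2 pos h hm =>
      rw [List.drop_eq_getElem_cons h, List.dropWhile_cons_of_neg]
      intro hspace
      exact hm (dom_isspace_ws _ (hdom _ (List.getElem_mem h)) hspace)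
  | case3 pos h =>
      rw [List.drop_eq_nil_iff.mpr (by omega)]
      rfl

lemma lstrip_fix (u : List Char) :
    List.dropWhile PySem.Chars.isspace (List.dropWhile PySem.Chars.isspace u) =
      List.dropWhile PySem.Chars.isspace u := List.dropWhile_idempotent _ u

-- rstrip of a string with no leading whitespace is empty iff the string is
lemma rstrip_eq_nil_iff (u : List Char)
    (h : List.dropWhile PySem.Chars.isspace u = u) : PySem.Chars.rstrip u = [] ↔ u = [] := by
  constructor
  · intro h0
    cases u with
    | nil => rfl
    | cons a as =>
        have hall : ∀ x ∈ (a :: as).reverse, PySem.Chars.isspace x = true := by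
          rw [← List.dropWhile_eq_nil_iff (p := PySem.Chars.isspace)]
          simpa [PySem.Chars.rstrip, List.reverse_eq_nil_iff] using h0
        have ha : PySem.Chars.isspace a = true := hall a (by simp)
        have : List.dropWhile PySem.Chars.isspace (a :: as) = List.dropWhile PySem.Chars.isspace as :=
          List.dropWhile_cons_of_pos ha
        rw [h] at this
        have := congrArg List.length this
        have hle := (List.dropWhile_sublist (l := as) PySem.Chars.isspace).length_le
        simp at this
        omega
  · rintro rfl; rfl

-- unfolding of rfindFrom when the bounds are already in range
lemma rfindFrom_inrange (s sub : List Char) (st e : Int) (h0 : 0 ≤ st) (h1 : st ≤ e)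
    (h2 : e ≤ (s.length : Int)) :
    PySem.Chars.rfindFrom s sub st (some e) =
      (if PySem.Chars.rfind ((s.take e.toNat).drop st.toNat) sub = -1 then -1
       else st + PySem.Chars.rfind ((s.take e.toNat).drop st.toNat) sub) := by
  simp only [PySem.Chars.rfindFrom]
  split_ifs <;> first | rfl | omega

-- one loop iteration of A matches one of B (ih is the outer induction hypothesis)
lemma step_core (line : List Char) (maxc : Int) (hdom : ∀ c ∈ line, pvDomChar c = true)
    (fa fb : Nat)
    (ih : ∀ fb pos p acc, pos ≤ line.length → (p = 0 ∨ p = 2) →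
      (p = 2 → List.dropWhile PySem.Chars.isspace (line.drop pos) = line.drop pos) →
      (p = 0 → pos = 0 ∧ maxc < (line.length : Int)) →
      line.length - pos < fa → line.length - pos < fb →
      aLoop fa maxc (List.replicate p ' ' ++ line.drop pos) acc = bLoop fb line maxc pos p acc)
    (pos p mN : Nat) (acc : List (List Char)) (eA eB : Int)
    (hpos : pos ≤ line.length) (hp : p = 0 ∨ p = 2)
    (hm1 : 1 ≤ mN) (hm2 : pos + mN < line.length)
    (heA : eA = (p : Int) + (mN : Int)) (heB : eB = (pos : Int) + (mN : Int))
    (hfa : line.length - pos < fa + 1) (hfb : line.length - pos < fb + 1) :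
    aLoop fa maxc
        ([' ', ' '] ++ PySem.Chars.lstrip
          (PySem.List.slice (List.replicate p ' ' ++ line.drop pos) (some eA) none))
        (acc ++ [PySem.Chars.rstrip
          (PySem.List.slice (List.replicate p ' ' ++ line.drop pos) none (some eA))])
      = bLoop fb line maxc (skipWs line eB.toNat) 2
        (acc ++ [if PySem.Chars.rstrip (PySem.List.slice line (some (pos : Int)) (some eB)) = []
                 then []
                 else List.replicate p ' ' ++
                   PySem.Chars.rstrip (PySem.List.slice line (some (pos : Int)) (some eB))]) := by
  subst heA heB
  have hp2 : p ≤ 2 := by omega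
  have htoA : ((p : Int) + (mN : Int)).toNat = p + mN := by omega
  have htoB : ((pos : Int) + (mN : Int)).toNat = pos + mN := by omega
  have hsliceA1 : PySem.List.slice (List.replicate p ' ' ++ line.drop pos) none (some ((p : Int) + (mN : Int)))
      = List.replicate p ' ' ++ (line.drop pos).take mN := by
    rw [PySem.List.slice_to _ (by omega), htoA, List.take_append, List.take_replicate,
      List.length_replicate, show min (p + mN) p = p from by omega,
      show p + mN - p = mN from by omega]
  have hsliceA2 : PySem.List.slice (List.replicate p ' ' ++ line.drop pos) (some ((p : Int) + (mN : Int))) none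
      = line.drop (pos + mN) := by
    rw [PySem.List.slice_from _ (by omega), htoA, List.drop_append, List.drop_replicate,
      List.length_replicate, show p - (p + mN) = 0 from by omega,
      show p + mN - p = mN from by omega, List.replicate_zero, List.nil_append, List.drop_drop]
  have hsliceB : PySem.List.slice line (some (pos : Int)) (some ((pos : Int) + (mN : Int)))
      = (line.drop pos).take mN := by
    rw [PySem.List.slice_toNat _ (by omega) (by omega), htoB, Int.toNat_natCast,
      show pos + mN - pos = mN from by omega]
  rw [hsliceA1, hsliceB, rstrip_rep_append, hsliceA2, htoB]
  have hrec : [' ', ' '] ++ PySem.Chars.lstrip (line.drop (pos + mN))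
      = List.replicate 2 ' ' ++ line.drop (skipWs line (pos + mN)) := by
    rw [skipWs_drop line hdom (pos + mN)]; rfl
  rw [hrec]
  exact ih fb (skipWs line (pos + mN)) 2 _
    (skipWs_le _ _ (by omega)) (Or.inr rfl)
    (fun _ => by rw [skipWs_drop line hdom]; exact lstrip_fix _)
    (fun h => by omega)
    (by have := skipWs_ge line (pos + mN); omega)
    (by have := skipWs_ge line (pos + mN); omega)

-- the main loop correspondence
lemma loop_eq (line : List Char) (maxc : Int) (hdom : ∀ c ∈ line, pvDomChar c = true)
    (hmc : 3 ≤ maxc) :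
    ∀ fa fb pos p acc, pos ≤ line.length → (p = 0 ∨ p = 2) →
      (p = 2 → List.dropWhile PySem.Chars.isspace (line.drop pos) = line.drop pos) →
      (p = 0 → pos = 0 ∧ maxc < (line.length : Int)) →
      line.length - pos < fa → line.length - pos < fb →
      aLoop fa maxc (List.replicate p ' ' ++ line.drop pos) acc = bLoop fb line maxc pos p acc := by
  intro fa
  induction fa with
  | zero => intro fb pos p acc _ _ _ _ hfa _; omega
  | succ fa ih =>
    intro fb pos p acc hpos hp h2 h0 hfa hfb
    cases fb with
    | zero => omega
    | succ fb =>
    have hp2 : p ≤ 2 := by omega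
    simp only [aLoop, bLoop]
    by_cases hg : maxc < (p : Int) + ((line.length : Int) - (pos : Int))
    · -- both loops iterate once more
      have hgA : maxc < ((List.replicate p ' ' ++ line.drop pos).length : Int) := by
        simp only [List.length_append, List.length_replicate, List.length_drop]; omega
      rw [if_pos hgA, if_pos hg]
      -- the two rfind calls agree (modulo the space prefix / segment offset)
      have hkpos : (0 : Int) ≤ maxc - p := by omega
      have hkN : ∃ kN : Nat, (kN : Int) = maxc - p := ⟨(maxc - p).toNat, by omega⟩
      obtain ⟨kN, hkNdef⟩ := hkN
      have hk1 : 1 ≤ kN := by omega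
      have hkt : pos + kN < line.length := by omega
      have hulen : ((line.drop pos).take kN).length = kN := by
        rw [List.length_take, List.length_drop]; omega
      have hr0go : PySem.Chars.rfind ((line.drop pos).take kN) pvSub
          = PySem.Chars.rfind.go ((line.drop pos).take kN) pvSub ((line.drop pos).take kN).length := rfl
      have hr0nonneg : PySem.Chars.rfind ((line.drop pos).take kN) pvSub ≠ -1 →
          0 ≤ PySem.Chars.rfind ((line.drop pos).take kN) pvSub := by
        intro h; rw [hr0go] at h ⊢; exact (go_spec _ _ h).1
      have htake : (List.replicate p ' ' ++ line.drop pos).take maxc.toNat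
          = List.replicate p ' ' ++ (line.drop pos).take kN := by
        rw [List.take_append, List.take_replicate, List.length_replicate,
          show maxc.toNat = p + kN from by omega, show min (p + kN) p = p from by omega,
          show p + kN - p = kN from by omega]
      have hAfind : PySem.Chars.rfindFrom (List.replicate p ' ' ++ line.drop pos) pvSub 0 (some maxc)
          = if PySem.Chars.rfind ((line.drop pos).take kN) pvSub = -1 then -1
            else (p : Int) + PySem.Chars.rfind ((line.drop pos).take kN) pvSub := by
        rw [rfindFrom_inrange _ _ _ _ le_rfl (by omega)
          (by simp only [List.length_append, List.length_replicate, List.length_drop]; omega)]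
        rw [show ((0 : Int)).toNat = 0 from rfl, List.drop_zero, htake, rfind_shift p hp]
        by_cases hr : PySem.Chars.rfind ((line.drop pos).take kN) pvSub = -1
        · simp [hr]
        · have hna : (p : Int) + PySem.Chars.rfind ((line.drop pos).take kN) pvSub ≠ -1 := by
            have := hr0nonneg hr; omega
          simp [hr, hna]
      have hBfind : PySem.Chars.rfindFrom line pvSub (pos : Int) (some ((pos : Int) + maxc - (p : Int)))
          = if PySem.Chars.rfind ((line.drop pos).take kN) pvSub = -1 then -1
            else (pos : Int) + PySem.Chars.rfind ((line.drop pos).take kN) pvSub := by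
        rw [rfindFrom_inrange _ _ _ _ (by omega) (by omega) (by omega)]
        rw [show ((pos : Int) + maxc - (p : Int)).toNat = pos + kN from by omega,
          Int.toNat_natCast, List.drop_take, show pos + kN - pos = kN from by omega]
      rw [hAfind, hBfind]
      by_cases hr : PySem.Chars.rfind ((line.drop pos).take kN) pvSub = -1
      · rw [if_pos hr, if_pos hr,
          if_pos (show (-1 : Int) = -1 from rfl), if_pos (show (-1 : Int) = -1 from rfl)]
        exact step_core line maxc hdom fa fb ih pos p kN acc maxc ((pos : Int) + maxc - (p : Int))
          hpos hp hk1 hkt (by omega) (by omega) hfa hfb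
      · have h0le := hr0nonneg hr
        have hspec := go_spec ((line.drop pos).take kN) ((line.drop pos).take kN).length
          (by rw [← hr0go]; exact hr)
        rw [← hr0go] at hspec
        have hprefle := hspec.2.2.length_le
        rw [List.length_drop, hulen] at hprefle
        have hple : (PySem.Chars.rfind ((line.drop pos).take kN) pvSub).toNat + 2 ≤ kN := by
          have h1 := hspec.2.1
          rw [hulen] at h1
          rw [show pvSub.length = 2 from rfl] at hprefle
          omega
        rw [if_neg hr, if_neg hr, if_neg (by omega), if_neg (by omega)]
        exact step_core line maxc hdom fa fb ih pos p
          ((PySem.Chars.rfind ((line.drop pos).take kN) pvSub).toNat + 1) acc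
          ((p : Int) + PySem.Chars.rfind ((line.drop pos).take kN) pvSub + 1)
          ((pos : Int) + PySem.Chars.rfind ((line.drop pos).take kN) pvSub + 1)
          hpos hp (by omega) (by omega) (by omega) (by omega) hfa hfb
    · -- both loops stop
      have hgA : ¬ maxc < ((List.replicate p ' ' ++ line.drop pos).length : Int) := by
        simp only [List.length_append, List.length_replicate, List.length_drop]; omega
      rw [if_neg hgA, if_neg hg]
      have hp2' : p = 2 := by
        rcases hp with rfl | rfl
        · exfalso; obtain ⟨rfl, hlt⟩ := h0 rfl; omega
        · rfl
      subst hp2'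
      have ht := h2 rfl
      have hstrip : PySem.Chars.strip (List.replicate 2 ' ' ++ line.drop pos)
          = PySem.Chars.rstrip (line.drop pos) := by
        unfold PySem.Chars.strip PySem.Chars.lstrip
        rw [List.dropWhile_append,
          show List.dropWhile PySem.Chars.isspace (List.replicate 2 ' ') = [] from by decide]
        simpa using congrArg PySem.Chars.rstrip ht
      rw [hstrip]
      by_cases hnil : line.drop pos = []
      · rw [if_pos ((rstrip_eq_nil_iff _ ht).mpr hnil),
          if_neg (by rw [List.drop_eq_nil_iff] at hnil; omega)]
      · rw [if_neg (fun hh => hnil ((rstrip_eq_nil_iff _ ht).mp hh)),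
          if_pos (by rw [List.drop_eq_nil_iff] at hnil; omega)]
        rfl

-- ===== VERDICT (by name: the statement is the Claim_ definition above) =====
theorem chunk_long_line_py_spec : Claim_equal_chunk_long_line_py := by
  intro line maxc hdom hpre
  unfold Spec_chunk_long_line_py chunk_long_line_py chunk_long_line_py_alt
  by_cases hle : ((line.toList.length : Nat) : Int) ≤ maxc
  · rw [if_pos hle, if_pos hle]
  · rw [if_neg hle, if_neg hle]
    have hpre' : 3 ≤ maxc := by
      rcases hpre with h | h
      · exact absurd (by simpa [PySem.Str.len_eq] using h) hle
      · exact h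
    have hdom' : ∀ c ∈ line.toList, pvDomChar c = true := by
      have : pvDomStr line = true := by
        unfold Dom_chunk_long_line_py at hdom; simp at hdom; exact hdom.1
      simpa [pvDomStr, List.all_eq_true] using this
    have h := loop_eq line.toList maxc hdom' hpre'
      (line.toList.length + 2) (line.toList.length + 1) 0 0 []
      (by omega) (Or.inl rfl) (by simp) (fun _ => ⟨rfl, by simpa using lt_of_not_ge hle⟩)
      (by omega) (by omega)
    simp only [List.replicate_zero, List.drop_zero, List.nil_append] at h
    rw [h]
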